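-- pv_equiv track=rewrite | github.com/niceyeti/PMTools | ConversionScripts/xes2g.py | TransformTraces
-- ===== SOURCE A (Python) =====
-- def TransformTraces(traces, activitiesAsEdges=True):
-- 	newTraces = []
-- 	#set up the acitivity/resource index; this allows switching node/edge representations
-- 	if activitiesAsEdges:
-- 		actorIndex = 0
-- 		rscIndex = 1
-- 	else:
-- 		actorIndex = 1
-- 		rscIndex = 0
--
-- 	i = 0
-- 	while i < len(traces):
-- 		events = traces[i][1]
-- 		newEvents = []
--
-- 		#initialize the event list; this is important in terms of where how the START node is located
-- 		if activitiesAsEdges: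
-- 			newEvents = [["START",events[0][actorIndex].title().replace(" ",""),"BEGIN"]]
-- 		else:
-- 			newEvents = [["START", events[0][actorIndex].title().replace(" ",""), events[0][rscIndex].title().replace(" ","")]]
--
-- 		j = 0
-- 		while j < len(events) : #each event formatted as: [Paul, issueReceipt]
-- 			curActor = events[j][actorIndex].title().replace(" ","")
-- 			if j < len(events) - 1:
-- 				nextActor = events[j+1][actorIndex].title().replace(" ","")
-- 			else:
-- 				nextActor = "END"
-- 			activity = events[j][rscIndex].title().replace(" ","")
-- 			newEvents.append([curActor,nextActor,activity])
-- 			j += 1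
-- 		#new event list built, so just add it to the new trace list
-- 		newTraces.append([traces[i][0],newEvents])
-- 		i += 1
--
-- 	return newTraces
-- ===== SOURCE B (Python) =====
-- def TransformTraces(traces, activitiesAsEdges=True):
-- 	ai, ri = (0, 1) if activitiesAsEdges else (1, 0)
-- 	def norm(s):
-- 		return s.title().replace(" ", "")
-- 	out = []
-- 	for name, events in traces:
-- 		# single backward pass: carry the successor actor, build body back-to-front
-- 		nxt = "END"
-- 		body = []
-- 		for e in reversed(events):
-- 			cur = norm(e[ai])
-- 			body.append([cur, nxt, norm(e[ri])])
-- 			nxt = cur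
-- 		body.reverse()
-- 		# after the full backward pass, nxt is the first event's actor
-- 		if activitiesAsEdges:
-- 			start = ["START", nxt, "BEGIN"]
-- 		else:
-- 			start = ["START", nxt, norm(events[0][ri])]
-- 		out.append([name, [start] + body])
-- 	return out
-- ===== Notes on version B (the rewrite author's own statement) =====
-- stated objective: alternative
-- what changed: Replaces A's index-with-lookahead forward scan by a single backward fold over each trace: the successor actor is carried as accumulator state (no j+1 lookahead), the body is built back-to-front and reversed, and the START node's actor is the fold's final state.
import Mathlib
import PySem

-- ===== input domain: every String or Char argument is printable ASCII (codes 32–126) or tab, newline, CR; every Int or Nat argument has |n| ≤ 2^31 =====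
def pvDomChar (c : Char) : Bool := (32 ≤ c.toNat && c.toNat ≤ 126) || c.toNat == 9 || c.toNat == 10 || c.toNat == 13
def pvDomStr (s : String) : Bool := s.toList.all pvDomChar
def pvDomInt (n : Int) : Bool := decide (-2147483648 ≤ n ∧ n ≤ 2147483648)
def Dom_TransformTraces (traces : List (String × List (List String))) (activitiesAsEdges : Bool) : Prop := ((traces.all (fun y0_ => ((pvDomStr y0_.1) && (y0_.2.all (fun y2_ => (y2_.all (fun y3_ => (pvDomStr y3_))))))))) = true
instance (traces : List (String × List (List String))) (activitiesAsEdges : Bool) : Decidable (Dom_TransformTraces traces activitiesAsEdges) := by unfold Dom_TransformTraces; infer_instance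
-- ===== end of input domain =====

-- ===== PORT A =====
-- B replaces A's index-with-lookahead forward scan by a single backward fold
-- carrying the successor actor (objective: alternative). Equivalence is proved
-- on Pre_ (nonempty event lists, rows with ≥ 2 fields; elsewhere A raises).

-- hand port of Python str.title() on chars (exact on ASCII, the stated domain):
-- a letter is uppercased after a non-letter, lowercased after a letter
def pvTitleChars : List Char → Bool → List Char
  | [], _ => []
  | c :: rest, prevCased =>
    (if c.isAlpha then (if prevCased then c.toLower else c.toUpper) else c)
      :: pvTitleChars rest c.isAlpha

-- s.title().replace(" ", "")  (shared by both Pythons verbatim)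
def pvNorm (s : String) : String :=
  PySem.Str.replace (String.ofList (pvTitleChars s.toList false)) " " ""

-- inner 'while j < len(events)' loop of A (index with lookahead);
-- row/field reads use getD, identical to Python's indexing on every input Pre_ admits
def pvLoopJ (actorIndex rscIndex : Nat) (events : List (List String)) (j : Nat) :
    List (List String) :=
  if j < events.length then
    let curActor := pvNorm ((events.getD j []).getD actorIndex "")
    let nextActor :=
      if j < events.length - 1 then pvNorm ((events.getD (j+1) []).getD actorIndex "")
      else "END"
    let activity := pvNorm ((events.getD j []).getD rscIndex "")
    [curActor, nextActor, activity] :: pvLoopJ actorIndex rscIndex events (j+1)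
  else []
termination_by events.length - j

-- outer 'while i < len(traces)' loop of A
def pvLoopI (actorIndex rscIndex : Nat) (activitiesAsEdges : Bool) :
    List (String × List (List String)) → List (String × List (List String))
  | [] => []
  | (name, events) :: rest =>
    let first :=
      if activitiesAsEdges then
        ["START", pvNorm ((events.getD 0 []).getD actorIndex ""), "BEGIN"]
      else
        ["START", pvNorm ((events.getD 0 []).getD actorIndex ""),
          pvNorm ((events.getD 0 []).getD rscIndex "")]
    (name, first :: pvLoopJ actorIndex rscIndex events 0)
      :: pvLoopI actorIndex rscIndex activitiesAsEdges rest

def TransformTraces (traces : List (String × List (List String))) (activitiesAsEdges : Bool) : List (String × List (List String)) :=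
  let actorIndex := if activitiesAsEdges then 0 else 1
  let rscIndex := if activitiesAsEdges then 1 else 0
  pvLoopI actorIndex rscIndex activitiesAsEdges traces

-- ===== PORT B =====
-- per-trace backward pass of Source B: fold over reversed(events) carrying
-- (nxt, body-so-far); body is appended back-to-front and reversed afterwards
def TransformTraces_alt (traces : List (String × List (List String))) (activitiesAsEdges : Bool) : List (String × List (List String)) :=
  let ai := if activitiesAsEdges then 0 else 1
  let ri := if activitiesAsEdges then 1 else 0
  traces.map (fun (p : String × List (List String)) =>
    let st := (p.2.reverse).foldl
      (fun (acc : String × List (List String)) e =>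
        let cur := pvNorm (e.getD ai "")
        (cur, acc.2 ++ [[cur, acc.1, pvNorm (e.getD ri "")]]))
      ("END", [])
    let start :=
      if activitiesAsEdges then ["START", st.1, "BEGIN"]
      else ["START", st.1, pvNorm ((p.2.getD 0 []).getD ri "")]
    (p.1, start :: st.2.reverse))

-- ===== PRECONDITION & SPEC =====
-- Pre_ excludes exactly the inputs on which Python A raises IndexError:
-- a trace with an empty event list (events[0]) or an event row with fewer than
-- 2 fields (indices 0 and 1 are both read).
def Pre_TransformTraces (traces : List (String × List (List String))) (activitiesAsEdges : Bool) : Prop :=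
  ∀ p ∈ traces, p.2 ≠ [] ∧ ∀ e ∈ p.2, 2 ≤ e.length
instance (traces : List (String × List (List String))) (activitiesAsEdges : Bool) : Decidable (Pre_TransformTraces traces activitiesAsEdges) := by unfold Pre_TransformTraces; infer_instance
def pvWitness_TransformTraces : (List (String × List (List String))) × Bool :=
  ([("t1", [["bob smith", "issue receipt"], ["ANN", "check in"]])], true)

def Spec_TransformTraces (traces : List (String × List (List String))) (activitiesAsEdges : Bool) (out : List (String × List (List String))) : Prop := out = TransformTraces_alt traces activitiesAsEdges
instance (traces : List (String × List (List String))) (activitiesAsEdges : Bool) (out : List (String × List (List String))) : Decidable (Spec_TransformTraces traces activitiesAsEdges out) := by unfold Spec_TransformTraces; infer_instance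

-- ===== CLAIM (what is proved, stated in full; the proofs are below) =====
def Claim_equal_TransformTraces : Prop := ∀ (traces : List (String × List (List String))) (activitiesAsEdges : Bool), Dom_TransformTraces traces activitiesAsEdges → Pre_TransformTraces traces activitiesAsEdges → Spec_TransformTraces traces activitiesAsEdges (TransformTraces traces activitiesAsEdges)

-- ===== LEMMAS AND PROOFS =====
-- structural middle form of the per-trace body: recursion on the event list
def pvBodyRec (ai ri : Nat) : List (List String) → List (List String)
  | [] => []
  | e :: rest =>
    [pvNorm (e.getD ai ""),
     (match rest with | [] => "END" | e2 :: _ => pvNorm (e2.getD ai "")),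
     pvNorm (e.getD ri "")] :: pvBodyRec ai ri rest

set_option maxRecDepth 4096 in
lemma pvLoopJ_eq_bodyRec (ai ri : Nat) (events : List (List String)) (j : Nat) :
    pvLoopJ ai ri events j = pvBodyRec ai ri (events.drop j) := by
  fun_induction pvLoopJ ai ri events j with
  | case1 j h curActor nextActor activity ih =>
    have hdrop : events.drop j = events[j] :: events.drop (j + 1) :=
      List.drop_eq_getElem_cons h
    rw [hdrop]; simp only [pvBodyRec]; rw [ih]
    have hcur : curActor = pvNorm (events[j].getD ai "") := by
      simp [curActor, List.getD, List.getElem?_eq_getElem h]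
    have hact : activity = pvNorm (events[j].getD ri "") := by
      simp [activity, List.getD, List.getElem?_eq_getElem h]
    have hnext : nextActor =
        (match events.drop (j + 1) with
          | [] => "END" | e2 :: _ => pvNorm (e2.getD ai "")) := by
      by_cases h2 : j < events.length - 1
      · have hj1 : j + 1 < events.length := by omega
        simp only [nextActor]
        rw [dif_pos h2, List.drop_eq_getElem_cons hj1]
        simp [List.getD, List.getElem?_eq_getElem hj1]
      · have h3 : events.drop (j + 1) = [] := by
          apply List.drop_eq_nil_of_le; omega
        rw [h3]
        simp only [nextActor]
        exact dif_neg h2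
    rw [hcur, hact, hnext]
  | case2 j h =>
    have : events.drop j = [] := by apply List.drop_eq_nil_of_le; omega
    simp [this, pvBodyRec]

-- the head actor of an event list, as B's backward fold produces it
def pvHeadActor (ai : Nat) : List (List String) → String
  | [] => "END"
  | e :: _ => pvNorm (e.getD ai "")

-- B's backward fold computes (head actor, reversed structural body)
lemma pvFold_eq (ai ri : Nat) (events : List (List String)) :
    (events.reverse).foldl
      (fun (acc : String × List (List String)) e =>
        let cur := pvNorm (e.getD ai "")
        (cur, acc.2 ++ [[cur, acc.1, pvNorm (e.getD ri "")]]))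
      ("END", [])
    = (pvHeadActor ai events, (pvBodyRec ai ri events).reverse) := by
  rw [List.foldl_reverse]
  induction events with
  | nil => rfl
  | cons e rest ih =>
    simp only [List.foldr_cons, ih]
    cases rest with
    | nil => simp [pvHeadActor, pvBodyRec]
    | cons e2 r2 => simp [pvHeadActor, pvBodyRec]

-- ===== VERDICT (by name: the statement is the Claim_ definition above) =====
lemma pvMain (traces : List (String × List (List String))) (aae : Bool)
    (hpre : Pre_TransformTraces traces aae) :
    TransformTraces traces aae = TransformTraces_alt traces aae := by
  unfold TransformTraces TransformTraces_alt
  simp only []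
  induction traces with
  | nil => rfl
  | cons p rest ih =>
    obtain ⟨name, events⟩ := p
    have hp := hpre (name, events) (List.mem_cons_self ..)
    have hrest : Pre_TransformTraces rest aae := fun q hq => hpre q (List.mem_cons_of_mem _ hq)
    rw [List.map_cons, pvLoopI, ih hrest, pvLoopJ_eq_bodyRec, List.drop_zero, pvFold_eq]
    cases events with
    | nil => exact absurd rfl hp.1
    | cons e es =>
      cases aae <;> simp [pvHeadActor, List.getD]

-- ===== VERDICT (continued) =====
theorem TransformTraces_spec : Claim_equal_TransformTraces :=
  fun traces aae _ hpre => pvMain traces aae hpre
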